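-- pv_equiv track=rewrite | github.com/miliar/Code_Jam_Webscraper | solutions_python/Problem_203/615.py | solve
-- ===== SOURCE A (Python) =====
-- def next_valid_line(p, j):
--     for i in range(j, len(p)):
--         if p[i][0] != '?':
--             return p[i]
--     return None
--
-- def prev_valid_line(p, j):
--     for i in reversed(range(0, j)):
--         if p[i][0] != '?':
--             return p[i]
--
-- def solve(p):
--     # Keep going down until you hist something
--     n = []
--     c = ''
--     i = 0
--     j = 0
--     found = False
--
--     for i in range(0, len(p)):
--         found = False
--         c = ''
--         j = 0
--
--         while j < len(p[0]):
--             if found is False: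
--                 if p[i][j] != '?':
--                     c = p[i][j]
--                     found = True
--                     j = -1
--             else:
--                 if p[i][j] == '?':
--                     p[i][j] = c
--                 else:
--                     c = p[i][j]
--             j += 1
--
--     # Handle empty rows
--     for i in range(0, len(p)):
--         if p[i][0] == '?':
--             n = next_valid_line(p, i)
--             p[i] = n if n is not None else prev_valid_line(p, i)
--
--     # Run again to handle empty first rows
--     if p[-1][0] == '?':
--         p[-1] = p[-2]
--
--     return p
-- ===== SOURCE B (Python) =====
-- def solve(p):
--     W = len(p[0])
--     # 1) fill each row left-to-right from the last non-'?' cell (seeded with the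
--     #    row's first non-'?' value); rows with no such value become None
--     filled = []
--     for row in p:
--         vals = [v for v in row[:W] if v != '?']
--         if not vals:
--             filled.append(None)
--         else:
--             c = vals[0]
--             new = list(row)
--             for j in range(W):
--                 if new[j] == '?':
--                     new[j] = c
--                 else:
--                     c = new[j]
--             filled.append(new)
--     # 2) backward sweep: nearest filled row at or below each position
--     nxt = None
--     below = []
--     for row in reversed(filled):
--         if row is not None:
--             nxt = row
--         below.append(nxt)
--     below.reverse()
--     # 3) forward sweep: empty rows take the row from below, else the last one above
--     prev = None
--     res = []
--     for row, fallback in zip(filled, below):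
--         if row is not None:
--             prev = row
--             res.append(row)
--         else:
--             res.append(fallback if fallback is not None else prev)
--     return res
-- ===== Notes on version B (the rewrite author's own statement) =====
-- stated objective: alternative
-- what changed: A fixes empty rows by re-scanning the grid with next_valid_line/prev_valid_line for each such row; B instead computes each row's replacement with one backward sweep (nearest filled row below) and one forward sweep (last filled row above), with no per-row rescans.
import Mathlib
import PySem

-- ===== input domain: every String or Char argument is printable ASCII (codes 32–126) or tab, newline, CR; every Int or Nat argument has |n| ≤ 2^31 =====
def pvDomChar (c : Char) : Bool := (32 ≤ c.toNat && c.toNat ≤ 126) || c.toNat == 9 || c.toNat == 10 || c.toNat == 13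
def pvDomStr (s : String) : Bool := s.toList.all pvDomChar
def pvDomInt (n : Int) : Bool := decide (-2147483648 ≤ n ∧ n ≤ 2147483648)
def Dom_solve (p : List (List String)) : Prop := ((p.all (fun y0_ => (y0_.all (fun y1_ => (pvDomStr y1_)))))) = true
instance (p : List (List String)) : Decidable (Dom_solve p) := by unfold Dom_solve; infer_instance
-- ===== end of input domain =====

-- B replaces A's per-empty-row rescans (next_valid_line/prev_valid_line) by one backward
-- and one forward sweep over the rows.  A mutates p in place and returns it; the
-- equivalence proved here is about the return value only.

-- ===== PORT A =====
-- for i in range(j, len(p)): if p[i][0] != '?': return p[i];  return None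
def nextValidA (p : List (List String)) (j : Nat) : Option (List String) :=
  if _h : j < p.length then
    if (p.getD j []).getD 0 "" ≠ "?" then some (p.getD j [])
    else nextValidA p (j+1)
  else none
termination_by p.length - j

-- for i in reversed(range(0, j)): if p[i][0] != '?': return p[i]
def prevValidA (p : List (List String)) (j : Nat) : Option (List String) :=
  match j with
  | 0 => none
  | Nat.succ i => if (p.getD i []).getD 0 "" ≠ "?" then some (p.getD i []) else prevValidA p i

-- the inner `while j < len(p[0])` loop of A, acting on row i
def whileA (W : Nat) (row : List String) (c : String) (found : Bool) (j : Nat) : List String :=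
  if _h : j < W then
    if found = false then
      if (row.getD j "") ≠ "?" then
        whileA W row (row.getD j "") true 0   -- Python sets j = -1 and then runs j += 1
      else
        whileA W row c false (j+1)
    else
      if row.getD j "" = "?" then whileA W (row.set j c) c true (j+1)
      else whileA W row (row.getD j "") true (j+1)
  else row
termination_by (if found then W - j else 2*W + 1 - j)
decreasing_by all_goals (split <;> first | omega | (simp_all <;> omega))

def solve (p : List (List String)) : List (List String) :=
  -- len(p[0]); the loops never change a row's length, so Python's re-evaluated
  -- `len(p[0])` is this constant on every input A returns on
  let W := (p.getD 0 []).length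
  -- first loop: fill every '?' inside each row
  let p1 := (List.range p.length).foldl
    (fun g i => g.set i (whileA W (g.getD i []) "" false 0)) p
  -- second loop: replace rows that are still empty
  let p2 := (List.range p1.length).foldl
    (fun g i =>
      if (g.getD i []).getD 0 "" = "?" then
        g.set i (match nextValidA g i with
                 | some n => n
                 | none => (prevValidA g i).getD [])  -- Python stores None here; outside Pre_solve
      else g) p1
  -- if p[-1][0] == '?': p[-1] = p[-2]   (indices in range on every input A returns on)
  if (p2.getD (p2.length - 1) []).getD 0 "" = "?" then
    p2.set (p2.length - 1) (p2.getD (p2.length - 2) [])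
  else p2

-- ===== PORT B =====
-- body of B's per-row `for j in range(W)` loop
def stepB (st : List String × String) (j : Nat) : List String × String :=
  if st.1.getD j "" = "?" then (st.1.set j st.2, st.2) else (st.1, st.1.getD j "")

-- one row: None if it has no value in its first W cells, else the filled copy
def fillRowB (W : Nat) (row : List String) : Option (List String) :=
  let vals := (row.take W).filter (fun v => v ≠ "?")
  if vals = [] then none
  else some (((List.range W).foldl stepB (row, vals.headD "")).1)

-- backward pass (loop over reversed(filled), then reverse): nearest filled row at or below
def backB (filled : List (Option (List String))) :
    List (Option (List String)) × Option (List String) :=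
  filled.foldr (fun f acc =>
      let nxt := match f with | some r => some r | none => acc.2
      (nxt :: acc.1, nxt))
    ([], none)

-- forward pass over zip(filled, below), tracking the last filled row seen
def fwdB : List (Option (List String)) → List (Option (List String)) →
    Option (List String) → List (List String)
  | f :: fs, o :: os, prev =>
    (match f with
     | some r => r :: fwdB fs os (some r)
     | none => (match o with | some r => r | none => prev.getD []) :: fwdB fs os prev)
  | _, _, _ => []

def solve_alt (p : List (List String)) : List (List String) :=
  let filled := p.map (fillRowB (p.getD 0 []).length)
  fwdB filled (backB filled).1 none

-- ===== PRECONDITION & SPEC =====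
-- Pre_solve is exactly where Python A returns normally: A raises IndexError on an empty
-- grid, on a zero-width first row and on rows shorter than the first row, and a
-- TypeError (None subscripted / returned) when no row has a value in its first len(p[0])
-- cells; those inputs are excluded.
def Pre_solve (p : List (List String)) : Prop :=
  p ≠ [] ∧ 1 ≤ (p.getD 0 []).length ∧
  (∀ row ∈ p, (p.getD 0 []).length ≤ row.length) ∧
  (∃ row ∈ p, ∃ v ∈ row.take (p.getD 0 []).length, v ≠ "?")
instance (p : List (List String)) : Decidable (Pre_solve p) := by unfold Pre_solve; infer_instance

def pvWitness_solve : List (List String) := [["a", "?"], ["?", "?"]]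

def Spec_solve (p : List (List String)) (out : List (List String)) : Prop := out = solve_alt p
instance (p : List (List String)) (out : List (List String)) : Decidable (Spec_solve p out) := by unfold Spec_solve; infer_instance

-- ===== CLAIM (what is proved, stated in full; the proofs are below) =====
def Claim_equal_solve : Prop := ∀ (p : List (List String)), Dom_solve p → Pre_solve p → Spec_solve p (solve p)

-- ===== LEMMAS AND PROOFS =====

-- first Some of a list of options
def firstSome (l : List (Option (List String))) : Option (List String) := l.findSome? id
def lastSome (l : List (Option (List String))) : Option (List String) := firstSome l.reverse

-- the common specification of the second phase: a filled row stays, an empty slot takes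
-- the nearest filled row below it, else the last filled row above it
def outSpec : List (Option (List String)) → Option (List String) → List (List String)
  | [], _ => []
  | some r :: fs, _ => r :: outSpec fs (some r)
  | none :: fs, prev => ((firstSome fs).or prev).getD [] :: outSpec fs prev

theorem firstSome_nil : firstSome [] = none := rfl
theorem firstSome_cons_none (l : List (Option (List String))) :
    firstSome (none :: l) = firstSome l := rfl
theorem firstSome_cons_some (r : List String) (l : List (Option (List String))) :
    firstSome (some r :: l) = some r := rfl
theorem firstSome_append (l₁ l₂ : List (Option (List String))) :
    firstSome (l₁ ++ l₂) = (firstSome l₁).or (firstSome l₂) := List.findSome?_append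

theorem mem_of_firstSome (l : List (Option (List String))) (r : List String)
    (h : firstSome l = some r) : some r ∈ l := by
  induction l with
  | nil => simp [firstSome] at h
  | cons a t ih =>
    cases a with
    | none => exact List.mem_cons_of_mem _ (ih h)
    | some x =>
      simp [firstSome_cons_some] at h
      simp [h]

-- ---------- B's port computes outSpec ----------
theorem backB_cons (f : Option (List String)) (fs : List (Option (List String))) :
    backB (f :: fs) =
      ((match f with | some r => some r | none => (backB fs).2) :: (backB fs).1,
       (match f with | some r => some r | none => (backB fs).2)) := by
  cases f <;> simp [backB]

theorem backB_snd (fs : List (Option (List String))) : (backB fs).2 = firstSome fs := by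
  induction fs with
  | nil => rfl
  | cons f t ih => rw [backB_cons]; cases f <;> simp [ih, firstSome_cons_none, firstSome_cons_some]

theorem fwdB_backB (fs : List (Option (List String))) (prev : Option (List String)) :
    fwdB fs (backB fs).1 prev = outSpec fs prev := by
  induction fs generalizing prev with
  | nil => rfl
  | cons f t ih =>
    rw [backB_cons]
    cases f with
    | some r => simp [fwdB, outSpec, ih]
    | none =>
      simp only [fwdB, outSpec, ih, backB_snd]
      congr 1
      cases h : firstSome t <;> cases prev <;> simp [Option.or]

theorem solve_alt_eq (p : List (List String)) :
    solve_alt p = outSpec (p.map (fillRowB (p.getD 0 []).length)) none := by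
  simp [solve_alt, fwdB_backB]

-- ---------- outSpec: length, pointwise value, validity ----------
theorem outSpec_length (fs : List (Option (List String))) (prev : Option (List String)) :
    (outSpec fs prev).length = fs.length := by
  induction fs generalizing prev with
  | nil => rfl
  | cons f t ih => cases f <;> simp [outSpec, ih]

theorem lastSome_append_some (l : List (Option (List String))) (r : List String) :
    lastSome (l ++ [some r]) = some r := by
  simp [lastSome, firstSome_cons_some]

theorem lastSome_append_none (l : List (Option (List String))) :
    lastSome (l ++ [none]) = lastSome l := by
  simp [lastSome, firstSome_cons_none]

theorem outSpec_getD (fs : List (Option (List String))) :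
    ∀ (prev : Option (List String)) (i : Nat), i < fs.length →
    (outSpec fs prev).getD i [] =
      match fs.getD i none with
      | some r => r
      | none => ((firstSome (fs.drop i)).or ((lastSome (fs.take i)).or prev)).getD [] := by
  induction fs with
  | nil => intro _ i h; simp at h
  | cons f t ih =>
    intro prev i hi
    cases i with
    | zero =>
      cases f with
      | some r => simp [outSpec]
      | none => simp [outSpec, firstSome_cons_none, lastSome, firstSome]
    | succ i =>
      have hi' : i < t.length := by simpa using hi
      cases f with
      | some r =>
        have := ih (some r) i hi'
        simp only [outSpec, List.getD_cons_succ, List.drop_succ_cons, List.take_succ_cons]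
        rw [this]
        cases h : t.getD i none with
        | some _ => rfl
        | none =>
          have : lastSome (some r :: t.take i) = (lastSome (t.take i)).or (some r) := by
            simp [lastSome, firstSome_append, firstSome_cons_some, firstSome_nil]
          rw [this]
          cases firstSome (t.drop i) <;> cases lastSome (t.take i) <;> cases prev <;> rfl
      | none =>
        have := ih prev i hi'
        simp only [outSpec, List.getD_cons_succ, List.drop_succ_cons, List.take_succ_cons]
        rw [this]
        cases h : t.getD i none with
        | some _ => rfl
        | none =>
          have : lastSome (none :: t.take i) = lastSome (t.take i) := by
            simp [lastSome, firstSome_append, firstSome_cons_none, firstSome_nil]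
          rw [this]

theorem outSpec_valid (fs : List (Option (List String))) :
    ∀ (prev : Option (List String)),
    (∀ r, some r ∈ fs → r.getD 0 "" ≠ "?") →
    (∀ r, prev = some r → r.getD 0 "" ≠ "?") →
    ∀ r ∈ outSpec fs prev, r.getD 0 "" ≠ "?" := by
  induction fs with
  | nil => intro _ _ _ r hr; simp [outSpec] at hr
  | cons f t ih =>
    intro prev hfs hprev r hr
    cases f with
    | some x =>
      simp only [outSpec, List.mem_cons] at hr
      rcases hr with rfl | hr
      · exact hfs r (by simp)
      · exact ih (some x) (fun r h => hfs r (List.mem_cons_of_mem _ h))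
          (fun r h => hfs r (by simp [← Option.some_inj.mp h])) r hr
    | none =>
      simp only [outSpec, List.mem_cons] at hr
      rcases hr with rfl | hr
      · cases h : firstSome t with
        | some x =>
          have hm := mem_of_firstSome t x h
          simpa [h, Option.or] using hfs x (List.mem_cons_of_mem _ hm)
        | none =>
          cases hp : prev with
          | some x => simpa [h, hp, Option.or] using hprev x hp
          | none => simp [h, hp, Option.or]
      · exact ih prev (fun r h => hfs r (List.mem_cons_of_mem _ h)) hprev r hr

-- ---------- row lemmas ----------
theorem foldl_stepB_getD_zero (k : Nat) :
    ∀ (j : Nat) (st : List String × String), 1 ≤ j →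
    (((List.range' j k).foldl stepB st).1.getD 0 "") = st.1.getD 0 "" := by
  induction k with
  | zero => intro j st _; rfl
  | succ k ih =>
    intro j st hj
    rw [List.range'_succ, List.foldl_cons]
    rw [ih (j+1) _ (by omega)]
    simp only [stepB]
    split
    · simp [List.getD_eq_getElem?_getD, List.getElem?_set_ne (by omega : j ≠ 0)]
    · rfl

theorem fillRowB_some_valid (W : Nat) (row : List String) (r : List String)
    (hW : 1 ≤ W) (hlen : W ≤ row.length) (h : fillRowB W row = some r) :
    r.getD 0 "" ≠ "?" := by
  unfold fillRowB at h
  by_cases hv : (row.take W).filter (fun v => v ≠ "?") = []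
  · rw [if_pos hv] at h; cases h
  · rw [if_neg hv] at h
    injection h with h
    rcases List.exists_cons_of_ne_nil hv with ⟨a, t, heq⟩
    have ha : a ∈ (row.take W).filter (fun v => v ≠ "?") := by rw [heq]; simp
    have hc : a ≠ "?" := by simpa using List.of_mem_filter ha
    rw [heq] at h
    simp only [List.headD_cons] at h
    have hr : List.range W = 0 :: List.range' 1 (W - 1) := by
      rw [List.range_eq_range']
      cases W with
      | zero => omega
      | succ w => simp [List.range'_succ]
    rw [hr, List.foldl_cons] at h
    rw [← h, foldl_stepB_getD_zero (W - 1) 1 _ (le_refl 1)]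
    simp only [stepB]
    split
    · simpa [List.getD_eq_getElem?_getD, List.getElem?_set_self (by omega : 0 < row.length)] using hc
    · next hne => simpa using hne

theorem fillRowB_none_head (W : Nat) (row : List String)
    (hW : 1 ≤ W) (hlen : W ≤ row.length) (h : fillRowB W row = none) :
    row.getD 0 "" = "?" := by
  have hall : ∀ a ∈ row.take W, a = "?" := by
    by_cases hv : (row.take W).filter (fun v => v ≠ "?") = []
    · intro a ha
      have := List.filter_eq_nil_iff.mp hv a ha
      simpa using this
    · unfold fillRowB at h; rw [if_neg hv] at h; cases h
  have h0 : 0 < row.length := by omega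
  have hmem : row[0] ∈ row.take W := by
    rw [List.mem_take_iff_getElem]
    refine ⟨0, by omega, rfl⟩
  simp [List.getD_eq_getElem?_getD, List.getElem?_eq_getElem h0, hall _ hmem]

-- A's found-phase equals B's fold
theorem whileA_found (W : Nat) (k : Nat) :
    ∀ (j : Nat) (row : List String) (c : String), W - j = k →
    whileA W row c true j = ((List.range' j k).foldl stepB (row, c)).1 := by
  induction k with
  | zero =>
    intro j row c hk
    rw [whileA]
    have : ¬ j < W := by omega
    simp [this]
  | succ k ih =>
    intro j row c hk
    have hj : j < W := by omega
    rw [whileA, List.range'_succ, List.foldl_cons]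
    simp only [hj, reduceDIte, stepB]
    rw [if_neg (by simp : ¬ (true = false))]
    by_cases hc : row.getD j "" = "?"
    · rw [if_pos hc, if_pos hc]; exact ih (j+1) _ _ (by omega)
    · rw [if_neg hc, if_neg hc]; exact ih (j+1) _ _ (by omega)

-- A's scanning phase: find the first non-'?' cell (or return the row unchanged)
theorem whileA_scan (W : Nat) (row : List String) (hlen : W ≤ row.length) (k : Nat) :
    ∀ (j : Nat) (c : String), W - j = k →
    whileA W row c false j =
      (match ((row.take W).drop j).filter (fun v => v ≠ "?") with
       | [] => row
       | c' :: _ => whileA W row c' true 0) := by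
  induction k with
  | zero =>
    intro j c hk
    rw [whileA]
    have h1 : ¬ j < W := by omega
    have h2 : (row.take W).drop j = [] := by
      apply List.drop_of_length_le
      simp [List.length_take]; omega
    simp [h1, h2]
  | succ k ih =>
    intro j c hk
    have hj : j < W := by omega
    have hjl : j < (row.take W).length := by simp [List.length_take]; omega
    have hdrop : (row.take W).drop j = row.getD j "" :: (row.take W).drop (j+1) := by
      rw [List.drop_eq_getElem_cons hjl]
      congr 1
      simp [List.getD_eq_getElem?_getD, List.getElem?_eq_getElem (by omega : j < row.length)]
    rw [whileA]
    simp only [hj, reduceDIte, reduceIte]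
    rw [hdrop]
    by_cases hc : row.getD j "" = "?"
    · simp only [hc, reduceIte, List.filter_cons, decide_eq_true_eq]
      simp only [ne_eq, not_true_eq_false, decide_false, reduceIte]
      exact ih (j+1) c (by omega)
    · simp only [hc, reduceIte, List.filter_cons]
      simp only [ne_eq, hc, not_false_eq_true, decide_true, reduceIte]

-- one row of A's first pass = B's fillRowB (or the row unchanged)
theorem rowA_eq_fillRowB (W : Nat) (row : List String) (hlen : W ≤ row.length) :
    whileA W row "" false 0 =
      (match fillRowB W row with | some r => r | none => row) := by
  rw [whileA_scan W row hlen W 0 "" (by omega)]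
  unfold fillRowB
  simp only [List.drop_zero]
  cases hv : (row.take W).filter (fun v => v ≠ "?") with
  | nil => simp
  | cons c' t =>
    simp only [reduceIte]
    rw [whileA_found W W 0 row c' (by omega), List.range_eq_range']
    rfl

-- A's first pass is a map
theorem foldl_set_map (F : List String → List String) (k : Nat) :
    ∀ (g : List (List String)) (i : Nat), g.length = i + k →
    (List.range' i k).foldl (fun g i => g.set i (F (g.getD i []))) g
      = g.take i ++ (g.drop i).map F := by
  induction k with
  | zero =>
    intro g i hl
    have h1 : g.take i = g := List.take_of_length_le (by omega)
    have h2 : g.drop i = ([] : List (List String)) := List.drop_of_length_le (by omega)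
    simp [h1, h2]
  | succ k ih =>
    intro g i hl
    have hi : i < g.length := by omega
    have hlt : (g.take i).length = i := by simp [List.length_take]; omega
    rw [List.range'_succ, List.foldl_cons]
    rw [ih _ (i+1) (by simp [List.length_set]; omega)]
    have hset : g.set i (F (g.getD i [])) = g.take i ++ F (g.getD i []) :: g.drop (i+1) := by
      rw [List.set_eq_take_append_cons_drop, if_pos hi]
    rw [hset]
    have htk : (g.take i ++ F (g.getD i []) :: g.drop (i+1)).take (i+1)
        = g.take i ++ [F (g.getD i [])] := by
      rw [List.take_append, List.take_of_length_le (by omega), hlt]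
      simp
    have hdr : (g.take i ++ F (g.getD i []) :: g.drop (i+1)).drop (i+1) = g.drop (i+1) := by
      rw [List.drop_append, List.drop_of_length_le (by omega), hlt]
      simp
    rw [htk, hdr]
    have hdi : g.drop i = g.getD i [] :: g.drop (i+1) := by
      rw [List.drop_eq_getElem_cons hi]
      congr 1
      simp [List.getD_eq_getElem?_getD, List.getElem?_eq_getElem hi]
    rw [hdi]
    simp

-- ===== the second pass =====
-- abbreviation for the grid state after the first pass
def gZero (p : List (List String)) : List (List String) :=
  p.map (fun row => match fillRowB (p.getD 0 []).length row with | some r => r | none => row)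

def fF (p : List (List String)) : List (Option (List String)) :=
  p.map (fillRowB (p.getD 0 []).length)

def outF (p : List (List String)) : List (List String) := outSpec (fF p) none

-- the hybrid grid after i steps of A's second pass
def gI (p : List (List String)) (i : Nat) : List (List String) :=
  (outF p).take i ++ (gZero p).drop i

-- A's second-pass step function
def step2 (g : List (List String)) (i : Nat) : List (List String) :=
  if (g.getD i []).getD 0 "" = "?" then
    g.set i (match nextValidA g i with
             | some n => n
             | none => (prevValidA g i).getD [])
  else g

-- pointwise descriptions of the grid after the first pass
theorem getD_mem (p : List (List String)) (i : Nat) (hi : i < p.length) :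
    p.getD i [] ∈ p := by
  rw [List.getD_eq_getElem?_getD, List.getElem?_eq_getElem hi]
  exact List.getElem_mem hi

theorem fF_length (p : List (List String)) : (fF p).length = p.length := by simp [fF]
theorem gZero_length (p : List (List String)) : (gZero p).length = p.length := by simp [gZero]
theorem outF_length (p : List (List String)) : (outF p).length = p.length := by
  simp [outF, outSpec_length, fF_length]

theorem fF_getD (p : List (List String)) (i : Nat) (hi : i < p.length) :
    (fF p).getD i none = fillRowB (p.getD 0 []).length (p.getD i []) := by
  simp [fF, List.getD_eq_getElem?_getD, List.getElem?_map, List.getElem?_eq_getElem hi]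

theorem gZero_getD (p : List (List String)) (i : Nat) (hi : i < p.length) :
    (gZero p).getD i [] =
      (match (fF p).getD i none with | some r => r | none => p.getD i []) := by
  rw [fF_getD p i hi]
  simp [gZero, List.getD_eq_getElem?_getD, List.getElem?_map, List.getElem?_eq_getElem hi]

theorem some_mem_of_getD (fs : List (Option (List String))) (j : Nat)
    (hj : j < fs.length) (r : List String) (hf : fs.getD j none = some r) : some r ∈ fs := by
  rw [List.getD_eq_getElem?_getD, List.getElem?_eq_getElem hj] at hf
  simp only [Option.getD_some] at hf
  rw [← hf]
  exact List.getElem_mem hj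

-- validity of the rows produced by the first pass / of outF's rows
theorem fF_some_valid (p : List (List String))
    (hW : 1 ≤ (p.getD 0 []).length)
    (hrect : ∀ row ∈ p, (p.getD 0 []).length ≤ row.length)
    (r : List String) (hr : some r ∈ fF p) : r.getD 0 "" ≠ "?" := by
  rcases List.mem_map.mp hr with ⟨row, hrow, heq⟩
  exact fillRowB_some_valid _ row r hW (hrect row hrow) heq

theorem outF_valid (p : List (List String))
    (hW : 1 ≤ (p.getD 0 []).length)
    (hrect : ∀ row ∈ p, (p.getD 0 []).length ≤ row.length) :
    ∀ r ∈ outF p, r.getD 0 "" ≠ "?" :=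
  outSpec_valid (fF p) none (fF_some_valid p hW hrect) (fun _ h => by cases h)

-- reading the hybrid grid gI
theorem gI_length (p : List (List String)) (i : Nat) (hi : i ≤ p.length) :
    (gI p i).length = p.length := by
  simp [gI, List.length_take, outF_length, gZero_length]
  omega

theorem take_outF_length (p : List (List String)) (i : Nat) (hi : i ≤ p.length) :
    ((outF p).take i).length = i := by
  simp [List.length_take, outF_length]; omega

theorem gI_getD_ge (p : List (List String)) (i j : Nat) (hi : i ≤ p.length) (hij : i ≤ j) :
    (gI p i).getD j [] = (gZero p).getD j [] := by
  have h1 := take_outF_length p i hi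
  simp only [gI, List.getD_eq_getElem?_getD]
  rw [List.getElem?_append_right (by omega), h1, List.getElem?_drop]
  congr 2
  omega

theorem gI_getD_lt (p : List (List String)) (i j : Nat) (hi : i ≤ p.length) (hij : j < i) :
    (gI p i).getD j [] = (outF p).getD j [] := by
  have h1 := take_outF_length p i hi
  simp only [gI, List.getD_eq_getElem?_getD]
  rw [List.getElem?_append_left (by omega), List.getElem?_take]
  simp [hij]

-- A's forward search over the hybrid grid = B's firstSome over the suffix
theorem nextValidA_gI (p : List (List String))
    (hW : 1 ≤ (p.getD 0 []).length)
    (hrect : ∀ row ∈ p, (p.getD 0 []).length ≤ row.length)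
    (i : Nat) (hi : i ≤ p.length) (k : Nat) :
    ∀ j, i ≤ j → p.length - j = k →
    nextValidA (gI p i) j = firstSome ((fF p).drop j) := by
  induction k with
  | zero =>
    intro j hij hk
    rw [nextValidA]
    have hgl : (gI p i).length = p.length := gI_length p i hi
    have h1 : ¬ j < (gI p i).length := by omega
    have h2 : (fF p).drop j = [] := List.drop_of_length_le (by rw [fF_length]; omega)
    simp [h1, h2, firstSome_nil]
  | succ k ih =>
    intro j hij hk
    have hj : j < p.length := by omega
    have hgl : (gI p i).length = p.length := gI_length p i hi
    have hcell : (gI p i).getD j [] = (gZero p).getD j [] := gI_getD_ge p i j hi hij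
    have hdrop : (fF p).drop j = (fF p).getD j none :: (fF p).drop (j+1) := by
      rw [List.drop_eq_getElem_cons (by rw [fF_length]; omega)]
      congr 1
      simp [List.getD_eq_getElem?_getD, List.getElem?_eq_getElem (by rw [fF_length]; omega : j < (fF p).length)]
    rw [nextValidA]
    simp only [hgl, hj, reduceDIte]
    rw [hcell, gZero_getD p j hj, hdrop]
    cases hf : (fF p).getD j none with
    | some r =>
      have hv : r.getD 0 "" ≠ "?" :=
        fF_some_valid p hW hrect r
          (some_mem_of_getD (fF p) j (by rw [fF_length]; omega) r hf)
      rw [if_pos hv, firstSome_cons_some]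
    | none =>
      have hq : ((p.getD j []).getD 0 "") = "?" := by
        have := fillRowB_none_head (p.getD 0 []).length (p.getD j [])
          hW (hrect _ (getD_mem p j hj)) (by rw [← fF_getD p j hj]; exact hf)
        exact this
      simp only [hq, ne_eq, not_true_eq_false, reduceIte, firstSome_cons_none]
      exact ih (j+1) (by omega) (by omega)

-- A's backward search over the hybrid grid returns the row placed just above
theorem prevValidA_gI (p : List (List String))
    (hW : 1 ≤ (p.getD 0 []).length)
    (hrect : ∀ row ∈ p, (p.getD 0 []).length ≤ row.length)
    (i : Nat) (hi : i + 1 ≤ p.length) :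
    prevValidA (gI p (i+1)) (i+1) = some ((outF p).getD i []) := by
  have hcell : (gI p (i+1)).getD i [] = (outF p).getD i [] :=
    gI_getD_lt p (i+1) i hi (by omega)
  have hmem : (outF p).getD i [] ∈ outF p := getD_mem (outF p) i (by rw [outF_length]; omega)
  have hv := outF_valid p hW hrect _ hmem
  simp only [prevValidA]
  rw [hcell, if_pos hv]

-- when no filled row exists at or below i, the row placed at i-1 is the last filled row above i
theorem lastSome_take_succ_some (fs : List (Option (List String))) (i : Nat)
    (hi : i < fs.length) (r : List String) (hf : fs.getD i none = some r) :
    lastSome (fs.take (i+1)) = some r := by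
  have : fs.take (i+1) = fs.take i ++ [some r] := by
    rw [List.take_succ]
    congr 1
    rw [List.getD_eq_getElem?_getD, List.getElem?_eq_getElem hi] at hf
    simp only [Option.getD_some] at hf
    simp [List.getElem?_eq_getElem hi, hf]
  rw [this, lastSome_append_some]

theorem lastSome_take_succ_none (fs : List (Option (List String))) (i : Nat)
    (hi : i < fs.length) (hf : fs.getD i none = none) :
    lastSome (fs.take (i+1)) = lastSome (fs.take i) := by
  have : fs.take (i+1) = fs.take i ++ [none] := by
    rw [List.take_succ]
    congr 1
    rw [List.getD_eq_getElem?_getD, List.getElem?_eq_getElem hi] at hf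
    simp only [Option.getD_some] at hf
    simp [List.getElem?_eq_getElem hi, hf]
  rw [this, lastSome_append_none]

theorem outF_prev (p : List (List String)) (i : Nat) (hi : i < p.length)
    (hnone : firstSome ((fF p).drop (i+1)) = none) :
    (outF p).getD i [] = (lastSome ((fF p).take (i+1))).getD [] := by
  have hif : i < (fF p).length := by rw [fF_length]; omega
  have := outSpec_getD (fF p) none i hif
  rw [outF] at *
  cases hf : (fF p).getD i none with
  | some r =>
    rw [this, hf]
    rw [lastSome_take_succ_some (fF p) i hif r hf]
    rfl
  | none =>
    rw [this, hf]
    have hdrop : (fF p).drop i = none :: (fF p).drop (i+1) := by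
      rw [List.drop_eq_getElem_cons hif]
      congr 1
      rw [List.getD_eq_getElem?_getD, List.getElem?_eq_getElem hif] at hf
      simpa using hf
    rw [hdrop, firstSome_cons_none, hnone]
    rw [lastSome_take_succ_none (fF p) i hif hf]
    cases lastSome ((fF p).take i) <;> rfl

-- one step of A's second loop
theorem step2_gI (p : List (List String))
    (hW : 1 ≤ (p.getD 0 []).length)
    (hrect : ∀ row ∈ p, (p.getD 0 []).length ≤ row.length)
    (i : Nat) (hi : i < p.length) :
    step2 (gI p i) i = gI p (i+1) := by
  have hile : i ≤ p.length := by omega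
  have hif : i < (fF p).length := by rw [fF_length]; omega
  have hio : i < (outF p).length := by rw [outF_length]; omega
  have hcell : (gI p i).getD i [] = (gZero p).getD i [] := gI_getD_ge p i i hile (le_refl i)
  have hspec := outSpec_getD (fF p) none i hif
  rw [show outSpec (fF p) none = outF p from rfl] at hspec
  -- the two hybrid grids as explicit appends
  have hgsplit : gI p i = (outF p).take i ++ ((gZero p).getD i [] :: (gZero p).drop (i+1)) := by
    rw [gI, List.drop_eq_getElem_cons (by rw [gZero_length]; omega : i < (gZero p).length)]
    congr 2
    simp [List.getD_eq_getElem?_getD, List.getElem?_eq_getElem (by rw [gZero_length]; omega : i < (gZero p).length)]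
  have hgsucc : gI p (i+1) = (outF p).take i ++ ((outF p).getD i [] :: (gZero p).drop (i+1)) := by
    rw [gI, List.take_succ]
    rw [List.getElem?_eq_getElem hio]
    simp only [Option.toList_some, List.append_assoc, List.singleton_append]
    congr 2
    simp [List.getD_eq_getElem?_getD, List.getElem?_eq_getElem hio]
  cases hf : (fF p).getD i none with
  | some r =>
    -- the row is already filled: A leaves it alone, and outF keeps it too
    have hval : r.getD 0 "" ≠ "?" :=
      fF_some_valid p hW hrect r (some_mem_of_getD (fF p) i hif r hf)
    have hg0 : (gZero p).getD i [] = r := by rw [gZero_getD p i hi, hf]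
    have hout : (outF p).getD i [] = r := by rw [hspec, hf]
    rw [step2, hcell, hg0]
    simp only [hval, reduceIte]
    rw [hgsplit, hgsucc, hg0, hout]
  | none =>
    have hg0 : (gZero p).getD i [] = p.getD i [] := by rw [gZero_getD p i hi, hf]
    have hq : (p.getD i []).getD 0 "" = "?" :=
      fillRowB_none_head _ _ hW (hrect _ (getD_mem p i hi))
        (by rw [← fF_getD p i hi]; exact hf)
    rw [step2, hcell, hg0]
    simp only [hq, reduceIte]
    have hnext := nextValidA_gI p hW hrect i hile (p.length - i) i (le_refl i) rfl
    have hdrop : (fF p).drop i = none :: (fF p).drop (i+1) := by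
      rw [List.drop_eq_getElem_cons hif]
      congr 1
      rw [List.getD_eq_getElem?_getD, List.getElem?_eq_getElem hif] at hf
      simpa using hf
    have hout : (outF p).getD i []
        = ((firstSome ((fF p).drop (i+1))).or ((lastSome ((fF p).take i)).or none)).getD [] := by
      rw [hspec, hf, hdrop, firstSome_cons_none]
    rw [hnext, hdrop, firstSome_cons_none]
    cases hfs : firstSome ((fF p).drop (i+1)) with
    | some r =>
      have : (outF p).getD i [] = r := by rw [hout, hfs]; rfl
      rw [hgsplit, hgsucc, ← this]
      rw [List.set_append]
      simp [take_outF_length p i hile]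
    | none =>
      -- no filled row at or below i: A falls back to the row placed just above
      cases i with
      | zero =>
        have : (outF p).getD 0 [] = [] := by
          rw [hout, hfs]
          simp [lastSome, firstSome_nil, Option.or]
        rw [hgsplit, hgsucc, this]
        simp only [prevValidA, Option.getD_none]
        rw [List.set_append]
        simp [take_outF_length p 0 hile]
      | succ i' =>
        have hprev := prevValidA_gI p hW hrect i' (by omega)
        rw [hprev]
        have hnone' : firstSome ((fF p).drop (i'+1)) = none := by
          have hd : (fF p).drop (i'+1) = none :: (fF p).drop (i'+1+1) := by
            rw [List.drop_eq_getElem_cons hif]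
            congr 1
            rw [List.getD_eq_getElem?_getD, List.getElem?_eq_getElem hif] at hf
            simpa using hf
          rw [hd, firstSome_cons_none]
          exact hfs
        have hlast : (outF p).getD i' [] = (lastSome ((fF p).take (i'+1))).getD [] :=
          outF_prev p i' (by omega) hnone'
        have hout' : (outF p).getD (i'+1) [] = (lastSome ((fF p).take (i'+1))).getD [] := by
          rw [hout, hfs]
          cases lastSome ((fF p).take (i'+1)) <;> rfl
        rw [hgsplit, hgsucc]
        simp only [Option.getD_some]
        rw [hlast, ← hout']
        rw [List.set_append]
        simp [take_outF_length p (i'+1) hile]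

-- the whole second loop
theorem pass2_fold (p : List (List String))
    (hW : 1 ≤ (p.getD 0 []).length)
    (hrect : ∀ row ∈ p, (p.getD 0 []).length ≤ row.length) (k : Nat) :
    ∀ i, i + k = p.length →
    (List.range' i k).foldl step2 (gI p i) = outF p := by
  induction k with
  | zero =>
    intro i hik
    have h1 : (outF p).take i = outF p := List.take_of_length_le (by rw [outF_length]; omega)
    have h2 : (gZero p).drop i = [] := List.drop_of_length_le (by rw [gZero_length]; omega)
    simp [gI, h1, h2]
  | succ k ih =>
    intro i hik
    rw [List.range'_succ, List.foldl_cons, step2_gI p hW hrect i (by omega)]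
    exact ih (i+1) (by omega)

-- assembling A's three phases
theorem solve_eq_outF (p : List (List String))
    (hne : p ≠ [])
    (hW : 1 ≤ (p.getD 0 []).length)
    (hrect : ∀ row ∈ p, (p.getD 0 []).length ≤ row.length) :
    solve p = outF p := by
  have hn : 1 ≤ p.length := by
    cases p with
    | nil => exact absurd rfl hne
    | cons a t => simp
  have h1 : (List.range p.length).foldl
      (fun g i => g.set i (whileA (p.getD 0 []).length (g.getD i []) "" false 0)) p
      = gZero p := by
    rw [List.range_eq_range']
    rw [foldl_set_map (fun row => whileA (p.getD 0 []).length row "" false 0) p.length p 0 (by omega)]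
    simp only [List.take_zero, List.drop_zero, List.nil_append]
    exact List.map_congr_left (fun row hrow => rowA_eq_fillRowB _ row (hrect row hrow))
  have h2 : (List.range (gZero p).length).foldl step2 (gZero p) = outF p := by
    rw [gZero_length, List.range_eq_range']
    have h0 : gI p 0 = gZero p := by simp [gI]
    rw [← h0]
    exact pass2_fold p hW hrect p.length 0 (by omega)
  have hvalid : ((outF p).getD ((outF p).length - 1) []).getD 0 "" ≠ "?" := by
    apply outF_valid p hW hrect
    apply getD_mem
    rw [outF_length]
    omega
  simp only [solve]
  rw [h1]
  rw [show (fun (g : List (List String)) (i : Nat) =>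
        if ((g.getD i []).getD 0 "" = "?") then
          g.set i (match nextValidA g i with
                   | some n => n
                   | none => (prevValidA g i).getD [])
        else g) = step2 from rfl]
  rw [h2]
  rw [if_neg hvalid]

-- ===== VERDICT (by name: the statement is the Claim_ definition above) =====
theorem solve_spec : Claim_equal_solve := by
  intro p _hD hpre
  obtain ⟨hne, hW, hrect, -⟩ := hpre
  unfold Spec_solve
  rw [solve_eq_outF p hne hW hrect, solve_alt_eq]
  rfl
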